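-- pv_equiv track=rewrite | github.com/FilipKalcic1/nova-verzija | tests/test_950_tools_accuracy.py | generate_test_cases_from_docs
-- ===== SOURCE A (Python) =====
-- from collections import defaultdict
-- from typing import Dict, List, Tuple, Optional, Any
--
-- def generate_test_cases_from_docs(
--     docs: Dict[str, Any],
--     categories: Dict[str, Any],
--     max_per_category: int = 5
-- ) -> List[Dict]:
--     """
--     Generate test cases from tool_documentation.json example_queries_hr.
--
--     For each tool that has example queries, create a test case where:
--     - Input: the example query
--     - Expected output: the tool should be in top-K search results
--
--     Args:
--         docs: Tool documentation dict
--         categories: Tool categories dict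
--         max_per_category: Max test cases per category
--
--     Returns:
--         List of test case dicts
--     """
--     # Build tool -> category mapping
--     tool_to_category = {}
--     for cat_name, cat_data in categories.items():
--         for tool_name in cat_data.get("tools", []):
--             tool_to_category[tool_name] = cat_name
--
--     # Count per category to limit
--     category_counts = defaultdict(int)
--
--     test_cases = []
--     for tool_name, doc in docs.items():
--         examples = doc.get("example_queries_hr", [])
--         if not examples:
--             continue
--
--         category = tool_to_category.get(tool_name, "uncategorized")
--
--         for example in examples:
--             if category_counts[category] >= max_per_category:
--                 break
--
--             if not example or len(example.strip()) < 5: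
--                 continue
--
--             test_cases.append({
--                 "query": example.strip(),
--                 "expected_tool": tool_name,
--                 "category": category,
--                 "source": "documentation",
--             })
--             category_counts[category] += 1
--
--     return test_cases
-- ===== SOURCE B (Python) =====
-- from collections import defaultdict
--
--
-- def generate_test_cases_from_docs(docs, categories, max_per_category=5):
--     # Pass 0: tool -> category (last category wins, like A's overwriting assignment).
--     tool_to_category = {
--         tool: cat_name
--         for cat_name, cat_data in categories.items()
--         for tool in cat_data.get("tools", [])
--     }
--
--     # Pass 1: collect every valid candidate (category, tool, stripped query) in docs order.
--     candidates = []
--     for tool_name, doc in docs.items():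
--         category = tool_to_category.get(tool_name, "uncategorized")
--         for example in doc.get("example_queries_hr", []):
--             if example and len(example.strip()) >= 5:
--                 candidates.append((category, tool_name, example.strip()))
--
--     # Pass 2: cap per category while preserving order.
--     counts = defaultdict(int)
--     test_cases = []
--     for category, tool_name, query in candidates:
--         if counts[category] < max_per_category:
--             test_cases.append({
--                 "query": query,
--                 "expected_tool": tool_name,
--                 "category": category,
--                 "source": "documentation",
--             })
--             counts[category] += 1
--     return test_cases
-- ===== Notes on version B (the rewrite author's own statement) =====
-- stated objective: alternative
-- what changed: A's single docs loop that filters, caps per category with a defaultdict and breaks early is split into two passes: first collect every valid (category, tool, stripped query) candidate in docs order, then a separate capping pass appends rows while each category's counter is below max_per_category.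
import Mathlib
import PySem

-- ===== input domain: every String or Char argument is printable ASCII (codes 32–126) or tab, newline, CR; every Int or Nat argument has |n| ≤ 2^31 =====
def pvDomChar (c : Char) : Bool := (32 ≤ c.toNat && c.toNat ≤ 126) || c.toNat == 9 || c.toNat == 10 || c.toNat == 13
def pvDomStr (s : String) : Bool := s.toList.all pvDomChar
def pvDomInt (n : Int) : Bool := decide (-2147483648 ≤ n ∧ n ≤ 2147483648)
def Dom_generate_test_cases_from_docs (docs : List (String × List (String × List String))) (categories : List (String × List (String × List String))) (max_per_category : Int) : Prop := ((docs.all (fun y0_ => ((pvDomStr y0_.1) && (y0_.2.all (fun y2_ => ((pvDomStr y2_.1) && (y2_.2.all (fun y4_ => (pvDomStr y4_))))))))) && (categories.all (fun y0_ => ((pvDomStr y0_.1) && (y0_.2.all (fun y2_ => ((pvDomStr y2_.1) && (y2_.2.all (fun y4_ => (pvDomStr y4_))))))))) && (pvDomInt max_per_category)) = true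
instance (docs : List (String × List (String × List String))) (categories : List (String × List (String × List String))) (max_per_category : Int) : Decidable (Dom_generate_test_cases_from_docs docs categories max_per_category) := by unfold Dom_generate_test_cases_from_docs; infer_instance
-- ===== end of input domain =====

-- B is the same collection task done as two passes (collect valid candidates, then cap per
-- category) instead of A's single loop with an early break; same cost, 'alternative' objective.

-- ===== PORT A =====
-- dict.get(k, []) on an inner dict (assoc list, unique keys)
def pvGetA (d : List (String × List String)) (k : String) : List String :=
  match d.find? (fun p => p.1 == k) with
  | some p => p.2
  | none => []

-- the appended test-case dict literal
def pvRowA (tool cat q : String) : List (String × String) :=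
  [("query", q), ("expected_tool", tool), ("category", cat), ("source", "documentation")]

-- 'for cat_name, cat_data in categories.items(): for tool_name in …: tool_to_category[tool_name] = cat_name'
def pvToolMapA (categories : List (String × List (String × List String))) : PySem.Dict String String :=
  categories.foldl (fun m c => (pvGetA c.2 "tools").foldl (fun m t => m.insert t c.1) m) PySem.Dict.empty

-- the 'for example in examples' loop, with its break / continue structure
def pvInnerA (tool cat : String) (maxc : Int) :
    List String → PySem.Dict String Int × List (List (String × String)) →
      PySem.Dict String Int × List (List (String × String))
  | [], st => st
  | e :: es, st =>
    if decide (maxc ≤ st.1.getD cat 0) then st   -- 'if category_counts[category] >= max_per_category: break'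
    else if (e == "") || decide (PySem.Str.len (PySem.Str.strip e) < 5) then
      pvInnerA tool cat maxc es st               -- 'continue'
    else
      pvInnerA tool cat maxc es
        (st.1.insert cat (st.1.getD cat 0 + 1), st.2 ++ [pvRowA tool cat (PySem.Str.strip e)])

def generate_test_cases_from_docs (docs : List (String × List (String × List String))) (categories : List (String × List (String × List String))) (max_per_category : Int) : List (List (String × String)) :=
  let tmap := pvToolMapA categories
  (docs.foldl (fun st p =>
      let examples := pvGetA p.2 "example_queries_hr"
      if examples == [] then st                  -- 'if not examples: continue'
      else pvInnerA p.1 (tmap.getD p.1 "uncategorized") max_per_category examples st)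
    (PySem.Dict.empty, [])).2

-- ===== PORT B =====
def pvGetB (d : List (String × List String)) (k : String) : List String :=
  match d.find? (fun p => p.1 == k) with
  | some p => p.2
  | none => []

def pvRowB (tool cat q : String) : List (String × String) :=
  [("query", q), ("expected_tool", tool), ("category", cat), ("source", "documentation")]

-- the dict comprehension {tool: cat for cat, cd in categories.items() for tool in cd.get("tools", [])}
def pvToolMapB (categories : List (String × List (String × List String))) : PySem.Dict String String :=
  categories.foldl (fun m c => (pvGetB c.2 "tools").foldl (fun m t => m.insert t c.1) m) PySem.Dict.empty

-- 'example and len(example.strip()) >= 5'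
def pvValidB (e : String) : Bool :=
  (!(e == "")) && decide (5 ≤ PySem.Str.len (PySem.Str.strip e))

-- pass 1: every valid (category, tool, stripped query), in docs order
def pvCandsB (tmap : PySem.Dict String String) (docs : List (String × List (String × List String))) :
    List (String × String × String) :=
  docs.foldl (fun cs p =>
    (pvGetB p.2 "example_queries_hr").foldl
      (fun cs e =>
        if pvValidB e then cs ++ [(tmap.getD p.1 "uncategorized", p.1, PySem.Str.strip e)] else cs)
      cs) []

-- pass 2: one capping step ('if counts[category] < max: append; counts[category] += 1')
def pvCapStepB (maxc : Int)
    (st : PySem.Dict String Int × List (List (String × String))) (c : String × String × String) :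
    PySem.Dict String Int × List (List (String × String)) :=
  if decide (st.1.getD c.1 0 < maxc) then
    (st.1.insert c.1 (st.1.getD c.1 0 + 1), st.2 ++ [pvRowB c.2.1 c.1 c.2.2])
  else st

def generate_test_cases_from_docs_alt (docs : List (String × List (String × List String))) (categories : List (String × List (String × List String))) (max_per_category : Int) : List (List (String × String)) :=
  ((pvCandsB (pvToolMapB categories) docs).foldl (pvCapStepB max_per_category)
    (PySem.Dict.empty, [])).2

-- ===== PRECONDITION & SPEC =====
def Spec_generate_test_cases_from_docs (docs : List (String × List (String × List String))) (categories : List (String × List (String × List String))) (max_per_category : Int) (out : List (List (String × String))) : Prop := out = generate_test_cases_from_docs_alt docs categories max_per_category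
instance (docs : List (String × List (String × List String))) (categories : List (String × List (String × List String))) (max_per_category : Int) (out : List (List (String × String))) : Decidable (Spec_generate_test_cases_from_docs docs categories max_per_category out) := by unfold Spec_generate_test_cases_from_docs; infer_instance

-- ===== CLAIM (what is proved, stated in full; the proofs are below) =====
def Claim_equal_generate_test_cases_from_docs : Prop := ∀ (docs : List (String × List (String × List String))) (categories : List (String × List (String × List String))) (max_per_category : Int), Dom_generate_test_cases_from_docs docs categories max_per_category → Spec_generate_test_cases_from_docs docs categories max_per_category (generate_test_cases_from_docs docs categories max_per_category)

-- ===== LEMMAS AND PROOFS =====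
-- A's skip test is the negation of B's validity test
theorem pvCond (e : String) :
    ((e == "") || decide (PySem.Str.len (PySem.Str.strip e) < 5)) = !(pvValidB e) := by
  unfold pvValidB
  rw [Bool.not_and, Bool.not_not]
  have h : decide (PySem.Str.len (PySem.Str.strip e) < 5)
      = !decide (5 ≤ PySem.Str.len (PySem.Str.strip e)) := by
    rw [← decide_not]
    exact decide_eq_decide.mpr not_le.symm
  rw [h]

-- once a category is full, the cap pass skips every candidate of that category
theorem pvCap_skip (maxc : Int) (cat : String) (cs : List (String × String × String))
    (st : PySem.Dict String Int × List (List (String × String)))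
    (hall : ∀ c ∈ cs, c.1 = cat) (hfull : maxc ≤ st.1.getD cat 0) :
    cs.foldl (pvCapStepB maxc) st = st := by
  induction cs with
  | nil => rfl
  | cons c cs ih =>
    have hc : c.1 = cat := hall c (List.mem_cons_self)
    have hstep : pvCapStepB maxc st c = st := by
      unfold pvCapStepB
      rw [hc]
      simp [not_lt.mpr hfull]
    simp only [List.foldl_cons, hstep]
    exact ih (fun c hm => hall c (List.mem_cons_of_mem _ hm))

-- A's inner loop over one tool's examples = B's cap pass over that tool's valid candidates
theorem pvInner_eq_cap (tool cat : String) (maxc : Int) (es : List String)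
    (st : PySem.Dict String Int × List (List (String × String))) :
    pvInnerA tool cat maxc es st =
      ((es.filter pvValidB).map (fun e => (cat, tool, PySem.Str.strip e))).foldl
        (pvCapStepB maxc) st := by
  induction es generalizing st with
  | nil => rfl
  | cons e es ih =>
    by_cases hfull : maxc ≤ st.1.getD cat 0
    · rw [pvInnerA, if_pos (by simpa using hfull)]
      refine (pvCap_skip maxc cat _ st ?_ hfull).symm
      intro c hc
      simp only [List.mem_map] at hc
      obtain ⟨x, _, rfl⟩ := hc
      rfl
    · rw [pvInnerA, if_neg (by simpa using hfull)]
      by_cases hv : pvValidB e = true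
      · rw [if_neg (by rw [pvCond, hv]; simp)]
        rw [List.filter_cons_of_pos hv, List.map_cons, List.foldl_cons]
        rw [ih]
        congr 1
        unfold pvCapStepB
        simp [not_le.mp hfull, pvRowA, pvRowB]
      · rw [if_pos (by rw [pvCond]; simp [Bool.eq_false_iff.mpr hv])]
        rw [List.filter_cons_of_neg (by simp [hv]), ih]

-- pass 1 is the concatenation, over docs, of each tool's valid candidates
theorem pvCands_aux (tmap : PySem.Dict String String)
    (docs : List (String × List (String × List String)))
    (cs0 : List (String × String × String)) :
    docs.foldl (fun cs p =>
        (pvGetB p.2 "example_queries_hr").foldl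
          (fun cs e =>
            if pvValidB e then cs ++ [(tmap.getD p.1 "uncategorized", p.1, PySem.Str.strip e)]
            else cs) cs) cs0 =
      cs0 ++ docs.flatMap (fun p =>
        ((pvGetB p.2 "example_queries_hr").filter pvValidB).map
          (fun e => (tmap.getD p.1 "uncategorized", p.1, PySem.Str.strip e))) := by
  induction docs generalizing cs0 with
  | nil => simp
  | cons p docs ih =>
    simp only [List.foldl_cons, List.flatMap_cons]
    rw [PySem.List.foldl_append_if, ih, List.append_assoc]

theorem pvMain (docs : List (String × List (String × List String)))
    (tmap : PySem.Dict String String) (maxc : Int)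
    (st : PySem.Dict String Int × List (List (String × String))) :
    docs.foldl (fun st p =>
        if (pvGetA p.2 "example_queries_hr") == [] then st
        else pvInnerA p.1 (tmap.getD p.1 "uncategorized") maxc
          (pvGetA p.2 "example_queries_hr") st) st =
      (pvCandsB tmap docs).foldl (pvCapStepB maxc) st := by
  unfold pvCandsB
  rw [pvCands_aux, List.nil_append]
  induction docs generalizing st with
  | nil => rfl
  | cons p docs ih =>
    simp only [List.foldl_cons, List.flatMap_cons, List.foldl_append]
    rw [← ih]
    congr 1
    have hg : pvGetA p.2 "example_queries_hr" = pvGetB p.2 "example_queries_hr" := rfl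
    by_cases he : pvGetA p.2 "example_queries_hr" = []
    · simp [he, ← hg]
    · rw [if_neg (by simpa using he), pvInner_eq_cap, hg]

-- ===== VERDICT (by name: the statement is the Claim_ definition above) =====
theorem generate_test_cases_from_docs_spec : Claim_equal_generate_test_cases_from_docs := by
  intro docs categories maxc _
  unfold Spec_generate_test_cases_from_docs generate_test_cases_from_docs generate_test_cases_from_docs_alt
  exact congrArg Prod.snd (pvMain docs (pvToolMapB categories) maxc (PySem.Dict.empty, []))
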